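-- pv_equiv track=rewrite | github.com/bbglab/intogen-plus | methods/schulze/summary.py | get_voters
-- ===== SOURCE A (Python) =====
-- def get_voters(gene, d):
--     """
--     Args:
--         gene: str: gene symbol
--         d: dict mapping method into dict mapping gene into rank
--     Returns:
--         methods: list of methods betting on symbol
--         best_methods: highest bidding methods
--         best_rank: best rank among voting methods
--         ranks: list of ranks from those methods betting on symbol
--     """
--
--     d_rank = {}
--     for method in d.keys():
--         if gene in d[method]:
--             d_rank[method] = d[method][gene]
--         else:
--             continue
--     methods = list(d_rank.keys())
--     if len(methods)==0:
--         print (gene)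
--     sorted_methods = sorted(d_rank.items(), key=lambda x: (x[1], x[0]))
--
--     try:
--         best_rank = sorted_methods[0][1]
--         best_methods = [k for k, v in sorted_methods if v == best_rank]
--         ranks = list(d_rank.values())
--     except:
--         best_rank = None
--         best_methods = None
--         ranks = None
--     return methods, best_methods, best_rank, ranks
-- ===== SOURCE B (Python) =====
-- def get_voters(gene, d):
--     """Single streaming pass: collect methods/ranks and track the running best
--     rank with its tied methods, instead of building a rank dict and sorting it."""
--     methods = []
--     ranks = []
--     best = None  # (best rank so far, methods tied at it, in iteration order)
--     for method, table in d.items():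
--         if gene not in table:
--             continue
--         r = table[gene]
--         methods.append(method)
--         ranks.append(r)
--         if best is None or r < best[0]:
--             best = (r, [method])
--         elif r == best[0]:
--             best[1].append(method)
--     if best is None:
--         print(gene)
--         return methods, None, None, None
--     return methods, sorted(best[1]), best[0], ranks
-- ===== Notes on version B (the rewrite author's own statement) =====
-- stated objective: alternative
-- what changed: Replaces A's rank-dict construction plus full (rank, method) sort by a single streaming pass that accumulates methods and ranks while tracking the running minimum rank and the methods tied at it, name-sorting only that tied group at the end; the no-voter try/except becomes an explicit early return.
import Mathlib
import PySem

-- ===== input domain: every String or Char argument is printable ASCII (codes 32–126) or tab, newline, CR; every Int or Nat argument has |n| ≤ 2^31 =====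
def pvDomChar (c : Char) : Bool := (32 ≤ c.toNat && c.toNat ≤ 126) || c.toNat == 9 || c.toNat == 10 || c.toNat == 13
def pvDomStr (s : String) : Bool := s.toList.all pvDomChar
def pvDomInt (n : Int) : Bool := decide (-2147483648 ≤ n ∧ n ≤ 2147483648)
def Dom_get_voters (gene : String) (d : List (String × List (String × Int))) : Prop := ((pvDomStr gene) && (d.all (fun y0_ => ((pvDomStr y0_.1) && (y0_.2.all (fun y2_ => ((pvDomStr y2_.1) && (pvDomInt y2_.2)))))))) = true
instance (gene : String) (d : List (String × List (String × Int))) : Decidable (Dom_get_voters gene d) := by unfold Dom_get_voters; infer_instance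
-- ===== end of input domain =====

-- B replaces A's rank-dict + full (rank, method) sort by ONE streaming pass that tracks the
-- running minimum rank and the methods tied at it, name-sorting only that tied group
-- (objective: alternative). Equivalence is about the RETURN value — the print of the gene
-- when no method votes is a side effect both Pythons perform alike and is not modelled.

-- ===== PORT A =====
-- shared input normalization: the Python arguments are dicts (duplicate keys overwrite in place)
def pvInner (l : List (String × Int)) : PySem.Dict String Int :=
  l.foldl (fun dd p => dd.insert p.1 p.2) PySem.Dict.empty

def pvOuter (d : List (String × List (String × Int))) : PySem.Dict String (PySem.Dict String Int) :=
  d.foldl (fun dd p => dd.insert p.1 (pvInner p.2)) PySem.Dict.empty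

def get_voters (gene : String) (d : List (String × List (String × Int))) :
    List String × Option (List String) × Option Int × Option (List Int) :=
  let D := pvOuter d
  -- for method in d.keys(): if gene in d[method]: d_rank[method] = d[method][gene]
  -- (the getD defaults are never used: method ∈ D.keys and the contains check precede the lookups)
  let d_rank := D.keys.foldl (fun dr method =>
      if (D.getD method PySem.Dict.empty).contains gene then
        dr.insert method ((D.getD method PySem.Dict.empty).getD gene 0)
      else dr) PySem.Dict.empty
  let methods := d_rank.keys
  let sorted_methods := PySem.List.sorted2 d_rank.items (fun x => x.2) (fun x => x.1)
  -- try: sorted_methods[0] … except: the None triple (IndexError on the empty list)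
  match sorted_methods with
  | [] => (methods, none, none, none)
  | m :: t =>
      let best_rank := m.2
      (methods, some (((m :: t).filter (fun p => p.2 == best_rank)).map (fun p => p.1)),
       some best_rank, some d_rank.values)

-- ===== PORT B =====
-- the loop body of Source B: append method and rank, update the running (best rank, tied methods)
def pvStep (st : List String × List Int × Option (Int × List String)) (x : String × Int) :
    List String × List Int × Option (Int × List String) :=
  (st.1 ++ [x.1], st.2.1 ++ [x.2],
   match st.2.2 with
   | none => some (x.2, [x.1])
   | some (b, ms) =>
       if x.2 < b then some (x.2, [x.1])
       else if x.2 == b then some (b, ms ++ [x.1])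
       else some (b, ms))

def get_voters_alt (gene : String) (d : List (String × List (String × Int))) :
    List String × Option (List String) × Option Int × Option (List Int) :=
  let D := pvOuter d
  -- for method, table in d.items(): if gene in table: … one pass, no rank dict
  let st := D.items.foldl (fun st p =>
      if p.2.contains gene then pvStep st (p.1, p.2.getD gene 0) else st)
    ([], [], none)
  match st.2.2 with
  | none => (st.1, none, none, none)
  | some (b, ms) => (st.1, some (PySem.List.sorted ms (fun x => x) false), some b, st.2.1)

-- ===== PRECONDITION & SPEC =====
def Spec_get_voters (gene : String) (d : List (String × List (String × Int))) (out : List String × Option (List String) × Option Int × Option (List Int)) : Prop := out = get_voters_alt gene d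
instance (gene : String) (d : List (String × List (String × Int))) (out : List String × Option (List String) × Option Int × Option (List Int)) : Decidable (Spec_get_voters gene d out) := by unfold Spec_get_voters; infer_instance

-- ===== CLAIM (what is proved, stated in full; the proofs are below) =====
def Claim_equal_get_voters : Prop := ∀ (gene : String) (d : List (String × List (String × Int))), Dom_get_voters gene d → Spec_get_voters gene d (get_voters gene d)

-- ===== LEMMAS AND PROOFS =====

-- proof-only closed form of B's running-best accumulator
def pvBest (L : List (String × Int)) : Option (Int × List String) :=
  match PySem.List.min? (L.map Prod.snd) (fun r => r) with
  | none => none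
  | some μ => some (μ, (L.filter (fun p => p.2 == μ)).map Prod.fst)

theorem min?_append_singleton (l : List Int) (r μ : Int)
    (h : PySem.List.min? l (fun y => y) = some μ) :
    PySem.List.min? (l ++ [r]) (fun y => y) = some (min μ r) := by
  cases l with
  | nil => rw [(PySem.List.min?_eq_none_iff ([] : List Int) _).mpr rfl] at h; cases h
  | cons a t =>
      rw [PySem.List.min?_id_cons] at h
      rw [List.cons_append, PySem.List.min?_id_cons, List.foldl_append]
      injection h with h; rw [h]; rfl

-- B's fold computes the method list, the rank list, and pvBest of the voter pairs
theorem fold_spec (L : List (String × Int)) :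
    L.foldl pvStep ([], [], none) = (L.map Prod.fst, L.map Prod.snd, pvBest L) := by
  induction L using List.reverseRecOn with
  | nil => rfl
  | append_singleton L x ih =>
      rw [List.foldl_append, List.foldl_cons, List.foldl_nil, ih]
      unfold pvStep pvBest
      simp only [List.map_append, List.map_cons, List.map_nil]
      cases h : PySem.List.min? (L.map Prod.snd) (fun r => r) with
      | none =>
          have hL : L = [] := List.map_eq_nil_iff.mp ((PySem.List.min?_eq_none_iff _ _).mp h)
          subst hL
          simp [PySem.List.min?_id_cons]
      | some μ =>
          rw [min?_append_singleton _ _ _ h]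
          dsimp only
          refine Prod.ext rfl (Prod.ext rfl ?_)
          have hmin : ∀ y ∈ L, μ ≤ y.2 := fun y hy =>
            PySem.List.min?_isMin h y.2 (List.mem_map_of_mem hy)
          rcases lt_trichotomy x.2 μ with hlt | heq | hgt
          · have hmn : min μ x.2 = x.2 := min_eq_right (le_of_lt hlt)
            have hfil : L.filter (fun p => p.2 == x.2) = [] := by
              rw [List.filter_eq_nil_iff]
              intro y hy
              have := hmin y hy
              simp only [beq_iff_eq]
              omega
            simp only [hlt, if_pos, hmn, List.filter_append, hfil, List.nil_append,
              List.filter_cons, List.filter_nil, beq_self_eq_true, if_pos, List.map_cons,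
              List.map_nil]
          · subst heq
            simp only [lt_irrefl, if_false, beq_self_eq_true, if_true, min_self,
              List.filter_append, List.filter_cons, List.filter_nil, List.map_append,
              List.map_cons, List.map_nil]
          · have hmn : min μ x.2 = μ := min_eq_left (le_of_lt hgt)
            have hx : (x.2 == μ) = false := by simp only [beq_eq_false_iff_ne]; omega
            have hlt' : ¬ x.2 < μ := not_lt_of_gt hgt
            simp only [hlt', if_false, hx, Bool.false_eq_true, hmn, List.filter_append,
              List.filter_cons, List.filter_nil, List.append_nil]

-- Python's tuple key (x[1], x[0]) is the lexicographic order: sorted2 is sorted with a Lex key.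
theorem sorted2_eq_sorted_lex (L : List (String × Int)) :
    PySem.List.sorted2 L (fun x => x.2) (fun x => x.1) =
      PySem.List.sorted L (fun p => (toLex (p.2, p.1) : Int ×ₗ String)) false := by
  have hb : (fun (a b : String × Int) => decide (a.2 < b.2) || (!decide (b.2 < a.2) && decide (a.1 < b.1)))
          = (fun (a b : String × Int) => decide ((toLex (a.2, a.1) : Int ×ₗ String) < toLex (b.2, b.1))) := by
    funext a b
    rcases lt_trichotomy a.2 b.2 with h|h|h
    · simp [Prod.Lex.lt_iff, h, lt_asymm h]
    · simp [Prod.Lex.lt_iff, h]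
    · simp [Prod.Lex.lt_iff, h, lt_asymm h, ne_of_gt h]
  simp only [PySem.List.sorted2, PySem.List.sorted, Bool.false_eq_true, if_false]
  rw [hb]

theorem nodup_keys_pvOuter (d : List (String × List (String × Int))) : (pvOuter d).keys.Nodup := by
  unfold pvOuter
  exact PySem.Dict.nodup_keys_foldl_insert_key _ _ _ _ (by simp [PySem.Dict.empty, PySem.Dict.keys])

-- the head of the (rank, name)-sorted voter list carries the minimum rank
theorem min_head (L : List (String × Int)) (m : String × Int) (t : List (String × Int))
    (hS : PySem.List.sorted L (fun p => (toLex (p.2, p.1) : Int ×ₗ String)) = m :: t) :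
    PySem.List.min? (L.map Prod.snd) (fun r => r) = some m.2 := by
  have hL : L ≠ [] := by
    intro h
    rw [(PySem.List.sorted_eq_nil_iff L _ false).mpr h] at hS
    simp at hS
  obtain ⟨μ, hμ⟩ : ∃ μ, PySem.List.min? (L.map Prod.snd) (fun r => r) = some μ := by
    cases h : PySem.List.min? (L.map Prod.snd) (fun r => r) with
    | none => rw [PySem.List.min?_eq_none_iff, List.map_eq_nil_iff] at h; exact absurd h hL
    | some μ => exact ⟨μ, rfl⟩
  have hmem := PySem.List.min?_mem hμ
  obtain ⟨y, hyL, hy2⟩ := List.mem_map.mp hmem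
  have hm : m ∈ L := (PySem.List.mem_sorted L _ false m).mp (by rw [hS]; exact List.mem_cons_self ..)
  have hle := PySem.List.key_head_sorted_le L (fun p => (toLex (p.2, p.1) : Int ×ₗ String)) hS y hyL
  have h1 : m.2 ≤ y.2 := by
    rcases Prod.Lex.le_iff.mp hle with h | ⟨h, _⟩
    · exact le_of_lt h
    · exact le_of_eq h
  have h2 : μ ≤ m.2 := PySem.List.min?_isMin hμ m.2 (List.mem_map_of_mem hm)
  rw [hμ]; exact congrArg some (le_antisymm h2 (hy2 ▸ h1))

-- the tied best methods of the sorted list are the name-sorted tied best methods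
theorem ties_sorted (L : List (String × Int)) (hnd : (L.map Prod.fst).Nodup)
    (m : String × Int) (t : List (String × Int))
    (hS : PySem.List.sorted L (fun p => (toLex (p.2, p.1) : Int ×ₗ String)) = m :: t) :
    PySem.List.sorted ((L.filter (fun p => p.2 == m.2)).map (fun p => p.1)) (fun x => x) false
      = ((m :: t).filter (fun p => p.2 == m.2)).map (fun p => p.1) := by
  have hperm : (m :: t).Perm L := hS ▸ PySem.List.sorted_perm L _ false
  apply PySem.List.sorted_eq_of_perm_of_pairwise_lt
  · exact ((hperm.filter _).map _)
  · rw [List.pairwise_map]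
    have hP : (m :: t).Pairwise (fun a b => (toLex (a.2, a.1) : Int ×ₗ String) ≤ toLex (b.2, b.1)) := by
      rw [← hS]; exact PySem.List.sorted_pairwise L _
    have hNd : (((m :: t).filter (fun p => p.2 == m.2)).map (fun p => p.1)).Nodup := by
      have : ((m :: t).map Prod.fst).Nodup := ((hperm.map Prod.fst).nodup_iff).mpr hnd
      exact this.sublist ((List.filter_sublist (l := m :: t)).map _)
    have hne : ((m :: t).filter (fun p => p.2 == m.2)).Pairwise (fun a b => (fun p => p.1) a ≠ (fun p => p.1) b) := by
      rw [← List.pairwise_map]; exact hNd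
    have hle : ((m :: t).filter (fun p => p.2 == m.2)).Pairwise (fun a b => (toLex (a.2, a.1) : Int ×ₗ String) ≤ toLex (b.2, b.1)) := hP.filter _
    refine (hle.and hne).imp_of_mem ?_
    intro a b ha hb ⟨h1, h2⟩
    have ha2 : a.2 = m.2 := by have := List.of_mem_filter ha; simpa using this
    have hb2 : b.2 = m.2 := by have := List.of_mem_filter hb; simpa using this
    rcases Prod.Lex.le_iff.mp h1 with h | ⟨_, h⟩
    · simp only [ofLex_toLex] at h; omega
    · exact lt_of_le_of_ne h h2

-- the filtered, rank-extracted voter pairs both ports iterate over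
def pvVoters (gene : String) (d : List (String × List (String × Int))) : List (String × Int) :=
  ((pvOuter d).items.filter (fun p => p.2.contains gene)).map (fun p => (p.1, p.2.getD gene 0))

theorem voters_nodup (gene : String) (d : List (String × List (String × Int))) :
    ((pvVoters gene d).map Prod.fst).Nodup := by
  unfold pvVoters
  rw [List.map_map]
  have : (((pvOuter d).items.filter (fun p => p.2.contains gene)).map
      ((fun p : String × Int => p.1) ∘ (fun p : String × PySem.Dict String Int => (p.1, p.2.getD gene 0))))
      = ((pvOuter d).items.filter (fun p => p.2.contains gene)).map Prod.fst := rfl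
  rw [this]
  exact (nodup_keys_pvOuter d).sublist (List.filter_sublist.map _)

-- the keys-with-lookup loop equals the items loop
theorem d_rank_eq (gene : String) (d : List (String × List (String × Int))) :
    (pvOuter d).keys.foldl (fun dr method =>
        if ((pvOuter d).getD method PySem.Dict.empty).contains gene then
          dr.insert method (((pvOuter d).getD method PySem.Dict.empty).getD gene 0)
        else dr) PySem.Dict.empty =
      (pvOuter d).items.foldl (fun dr p =>
        if p.2.contains gene then dr.insert p.1 (p.2.getD gene 0) else dr) PySem.Dict.empty := by
  rw [PySem.Dict.items_eq_map_keys _ (nodup_keys_pvOuter d) PySem.Dict.empty, List.foldl_map]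

-- A's d_rank has exactly the voter pairs as its items
theorem d_rank_items (gene : String) (d : List (String × List (String × Int))) :
    ((pvOuter d).keys.foldl (fun dr method =>
        if ((pvOuter d).getD method PySem.Dict.empty).contains gene then
          dr.insert method (((pvOuter d).getD method PySem.Dict.empty).getD gene 0)
        else dr) PySem.Dict.empty).items = pvVoters gene d := by
  rw [d_rank_eq gene d, PySem.List.foldl_if_eq_foldl_filter]
  have hmap : (((pvOuter d).items.filter (fun p => p.2.contains gene)).foldl
      (fun dr p => dr.insert p.1 (p.2.getD gene 0)) PySem.Dict.empty)
      = (pvVoters gene d).foldl (fun dr a => dr.insert a.1 a.2) PySem.Dict.empty := by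
    unfold pvVoters; rw [List.foldl_map]
  rw [hmap]
  have := PySem.Dict.items_foldl_insert_fresh (pvVoters gene d) Prod.fst Prod.snd PySem.Dict.empty
    (fun a _ => PySem.Dict.contains_empty a.1) (voters_nodup gene d)
  simpa using this

-- B's fold is the fold of pvStep over the voter pairs
theorem alt_fold_eq (gene : String) (d : List (String × List (String × Int))) :
    ((pvOuter d).items.foldl (fun st p =>
        if p.2.contains gene then pvStep st (p.1, p.2.getD gene 0) else st)
      ([], [], none))
      = (pvVoters gene d).foldl pvStep ([], [], none) := by
  rw [PySem.List.foldl_if_eq_foldl_filter]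
  unfold pvVoters
  rw [List.foldl_map]

-- A's sort-everything-take-head tail equals B's running-minimum result on any voter list
theorem core (L : List (String × Int)) (hnd : (L.map Prod.fst).Nodup) :
    (match PySem.List.sorted2 L (fun x => x.2) (fun x => x.1) with
     | [] => (L.map Prod.fst, (none : Option (List String)), (none : Option Int), (none : Option (List Int)))
     | m :: t => (L.map Prod.fst,
        some (((m :: t).filter (fun p : String × Int => p.2 == m.2)).map (fun p : String × Int => p.1)),
        some m.2, some (L.map Prod.snd)))
    = (match pvBest L with
     | none => (L.map Prod.fst, none, none, none)
     | some (b, ms) => (L.map Prod.fst, some (PySem.List.sorted ms (fun x => x) false),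
        some b, some (L.map Prod.snd))) := by
  rw [sorted2_eq_sorted_lex]
  unfold pvBest
  cases hS : PySem.List.sorted L (fun p => (toLex (p.2, p.1) : Int ×ₗ String)) with
  | nil =>
      have hL : L = [] := (PySem.List.sorted_eq_nil_iff _ _ false).mp hS
      subst hL; rfl
  | cons m t =>
      rw [min_head L m t hS]
      dsimp only
      rw [ties_sorted L hnd m t hS]

theorem keys_of_items (R : PySem.Dict String Int) (L : List (String × Int))
    (h : R.items = L) : R.keys = L.map Prod.fst := by
  rw [← h]; rfl

theorem values_of_items (R : PySem.Dict String Int) (L : List (String × Int))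
    (h : R.items = L) : R.values = L.map Prod.snd := by
  rw [← h]; rfl

-- ===== VERDICT (by name: the statement is the Claim_ definition above) =====
theorem get_voters_spec : Claim_equal_get_voters := by
  intro gene d _
  unfold Spec_get_voters get_voters get_voters_alt
  simp only [alt_fold_eq gene d, fold_spec,
    keys_of_items _ _ (d_rank_items gene d),
    values_of_items _ _ (d_rank_items gene d),
    d_rank_items gene d]
  exact core (pvVoters gene d) (voters_nodup gene d)
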